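-- pv_equiv track=rewrite | github.com/claudym/KuruKuruPa | python/codewars_kata/squarestrings.py | selfie_and_diag1
-- ===== SOURCE A (Python) =====
-- def diag_1_sym_matrix(s):
--   matrix = build_matrix(s)
--   new_matrix = []
--   elem = []
--
--   for i in range(len(matrix)):
--     for j in range(len(matrix[i])):
--       elem.append(matrix[j][i])
--     new_matrix.append(elem)
--     elem = []
--   return new_matrix
--
-- def selfie_and_diag1(s):
--   selfie_matrix = build_matrix(s)
--   diag_matrix = diag_1_sym_matrix(s)
--   new_matrix = []
--   elem = []
--
--   for i in range(len(selfie_matrix)):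
--     for ch in selfie_matrix[i]:
--       elem.append(ch)
--     elem.append('|')
--     for ch in diag_matrix[i]:
--       elem.append(ch)
--     new_matrix.append(elem)
--     elem = []
--   return pretty_print(new_matrix)
--
-- def build_matrix(s):
--   matrix = []
--   elem= []
--   for i in range(len(s)):
--     if s[i] != '\n':
--       elem.append(s[i])
--     else:
--       matrix.append(elem)
--       elem= []
--   matrix.append(elem)
--   return matrix
--
-- def pretty_print(matrix):
--   str_line = ''
--   str_matrix = []
--   for elem in matrix:
--     str_line = ''.join(elem)
--     str_matrix.append(str_line)
--
--   return '\n'.join(str_matrix)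
-- ===== SOURCE B (Python) =====
-- def selfie_and_diag1(s):
--     # One iterator per row: each side-by-side line consumes the next character
--     # of each needed row iterator (an online transpose, no transpose table and
--     # no indexing into the row contents).
--     rows = s.split('\n')
--     its = [iter(r) for r in rows]
--     lines = []
--     for row in rows:
--         cell = []
--         for j in range(len(row)):
--             cell.append(next(its[j]))
--         lines.append(row + '|' + ''.join(cell))
--     return '\n'.join(lines)
-- ===== Notes on version B (the rewrite author's own statement) =====
-- stated objective: alternative
-- what changed: B replaces A's pipeline (char-scan build_matrix, a separately materialized transpose table filled by nested index loops rows[j][i], then pretty_print) with one iterator per row: each side-by-side line consumes the next character of each needed row iterator, an online transpose with no transpose table and no indexing into row contents.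
import Mathlib
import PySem

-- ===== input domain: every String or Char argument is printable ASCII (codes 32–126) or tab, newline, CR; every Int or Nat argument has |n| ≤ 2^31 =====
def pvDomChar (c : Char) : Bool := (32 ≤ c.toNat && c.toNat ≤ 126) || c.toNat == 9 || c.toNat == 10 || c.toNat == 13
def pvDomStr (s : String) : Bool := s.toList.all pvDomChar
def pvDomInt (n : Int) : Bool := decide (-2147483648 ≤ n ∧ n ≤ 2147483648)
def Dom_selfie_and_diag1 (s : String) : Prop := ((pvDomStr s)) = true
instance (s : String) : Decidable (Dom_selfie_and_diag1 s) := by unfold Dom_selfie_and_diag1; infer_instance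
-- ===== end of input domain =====

-- B replaces A's materialized transpose table (nested index loops rows[j][i]) and helpers with
-- one iterator per row: each line consumes the next character of each needed row iterator
-- (objective: alternative). Neither program mutates its argument.

-- ===== PORT A =====
-- build_matrix: scan s char by char, flushing the current element at each '\n'
def pvBuildMatrix (s : String) : List (List Char) :=
  let p := s.toList.foldl
    (fun (acc : List (List Char) × List Char) c =>
      if c ≠ '\n' then (acc.1, acc.2 ++ [c]) else (acc.1 ++ [acc.2], []))
    ([], [])
  p.1 ++ [p.2]

-- diag_1_sym_matrix: build the transpose table with the same nested index loops as A
def pvDiag1SymMatrix (s : String) : List (List Char) :=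
  let matrix := pvBuildMatrix s
  (PySem.List.pyRange 0 matrix.length 1).foldl
    (fun new_matrix i =>
      new_matrix ++
        [(PySem.List.pyRange 0 (PySem.List.pyGetD matrix i []).length 1).foldl
          (fun elem j => elem ++ [PySem.List.pyGetD (PySem.List.pyGetD matrix j []) i ' ']) []])
    []

-- pretty_print: join each row, then join the rows with '\n'
def pvPrettyPrint (matrix : List (List Char)) : String :=
  String.ofList (PySem.Chars.join ['\n']
    (matrix.foldl (fun str_matrix elem => str_matrix ++ [elem.foldl (fun l c => l ++ [c]) []]) []))

def selfie_and_diag1 (s : String) : String :=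
  let selfie_matrix := pvBuildMatrix s
  let diag_matrix := pvDiag1SymMatrix s
  let new_matrix := (PySem.List.pyRange 0 selfie_matrix.length 1).foldl
    (fun new_matrix i =>
      let elem := (PySem.List.pyGetD selfie_matrix i []).foldl (fun e ch => e ++ [ch]) []
      let elem := elem ++ ['|']
      let elem := (PySem.List.pyGetD diag_matrix i []).foldl (fun e ch => e ++ [ch]) elem
      new_matrix ++ [elem])
    []
  pvPrettyPrint new_matrix

-- ===== PORT B =====
def selfie_and_diag1_alt (s : String) : String :=
  let rows := PySem.Chars.splitOn s.toList ['\n']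
  -- its = [iter(r) for r in rows]: each iterator is the remaining suffix of its row
  let p := rows.foldl
    (fun (acc : List (List Char) × List (List Char)) row =>
      let q := (PySem.List.pyRange 0 (row.length : Int) 1).foldl
        (fun (b : List (List Char) × List Char) j =>
          -- cell.append(next(its[j])): read the head of iterator j, then consume it
          -- (defaults are unreachable under Pre_, where Python never raises)
          (b.1.modify j.toNat List.tail,
           b.2 ++ [(PySem.List.pyGetD b.1 j []).headD ' ']))
        (acc.1, [])
      (q.1, acc.2 ++ [row ++ ['|'] ++ q.2]))
    (rows, [])
  String.ofList (PySem.Chars.join ['\n'] p.2)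

-- ===== PRECONDITION & SPEC =====
-- Pre_ excludes exactly the inputs where A raises IndexError: ragged inputs on which
-- some transpose access rows[j][i] is out of range.
def Pre_selfie_and_diag1 (s : String) : Prop :=
  let rows := PySem.Chars.splitOn s.toList ['\n']
  ∀ i < rows.length, ∀ j < (rows.getD i []).length,
    j < rows.length ∧ i < (rows.getD j []).length
instance (s : String) : Decidable (Pre_selfie_and_diag1 s) := by
  unfold Pre_selfie_and_diag1; infer_instance

def pvWitness_selfie_and_diag1 : String := "ab\ncd"

def Spec_selfie_and_diag1 (s : String) (out : String) : Prop := out = selfie_and_diag1_alt s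
instance (s : String) (out : String) : Decidable (Spec_selfie_and_diag1 s out) := by unfold Spec_selfie_and_diag1; infer_instance

-- ===== CLAIM (what is proved, stated in full; the proofs are below) =====
def Claim_equal_selfie_and_diag1 : Prop := ∀ (s : String), Dom_selfie_and_diag1 s → Pre_selfie_and_diag1 s → Spec_selfie_and_diag1 s (selfie_and_diag1 s)

-- ===== LEMMAS AND PROOFS =====

-- prepend p to the head piece of a split (the not-yet-flushed element)
def pvConsHead (p : List Char) : List (List Char) → List (List Char)
  | [] => [p]
  | r :: rs => (p ++ r) :: rs

-- reference split on '\n'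
def pvSplit : List Char → List (List Char)
  | [] => [[]]
  | c :: rest => if c = '\n' then [] :: pvSplit rest else pvConsHead [c] (pvSplit rest)

lemma pvSplit_ne_nil (l : List Char) : pvSplit l ≠ [] := by
  cases l with
  | nil => simp [pvSplit]
  | cons c rest =>
    simp only [pvSplit]
    split
    · simp
    · cases h : pvSplit rest <;> simp [pvConsHead]

lemma pvBuildMatrix_foldl (l : List Char) :
    ∀ (m : List (List Char)) (e : List Char),
      (l.foldl
        (fun (acc : List (List Char) × List Char) c =>
          if c ≠ '\n' then (acc.1, acc.2 ++ [c]) else (acc.1 ++ [acc.2], [])) (m, e)).1 ++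
      [(l.foldl
        (fun (acc : List (List Char) × List Char) c =>
          if c ≠ '\n' then (acc.1, acc.2 ++ [c]) else (acc.1 ++ [acc.2], [])) (m, e)).2]
        = m ++ pvConsHead e (pvSplit l) := by
  induction l with
  | nil => intro m e; simp [pvSplit, pvConsHead]
  | cons c rest ih =>
    intro m e
    by_cases hc : c = '\n'
    · rw [List.foldl_cons, if_neg (by simp [hc]), ih, pvSplit, if_pos hc]
      cases h : pvSplit rest with
      | nil => exact absurd h (pvSplit_ne_nil rest)
      | cons r rs => simp [pvConsHead]
    · rw [List.foldl_cons, if_pos hc, ih, pvSplit, if_neg hc]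
      cases h : pvSplit rest with
      | nil => exact absurd h (pvSplit_ne_nil rest)
      | cons r rs => simp [pvConsHead]

lemma pvBuildMatrix_eq_pvSplit (s : String) : pvBuildMatrix s = pvSplit s.toList := by
  show _ ++ _ = _
  rw [pvBuildMatrix_foldl s.toList [] []]
  cases h : pvSplit s.toList with
  | nil => exact absurd h (pvSplit_ne_nil s.toList)
  | cons r rs => simp [pvConsHead]

lemma pvSplitOn_go (l : List Char) :
    ∀ (fuel : Nat) (cur : List Char) (acc : List (List Char)),
      l.length ≤ fuel →
      PySem.Chars.splitOn.go ['\n'] fuel l cur acc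
        = acc.reverse ++ pvConsHead cur.reverse (pvSplit l) := by
  induction l with
  | nil =>
    intro fuel cur acc _
    cases fuel <;> simp [PySem.Chars.splitOn.go, pvSplit, pvConsHead]
  | cons c rest ih =>
    intro fuel cur acc hf
    cases fuel with
    | zero => simp at hf
    | succ f =>
      by_cases hc : c = '\n'
      · subst hc
        rw [show PySem.Chars.splitOn.go ['\n'] (f+1) ('\n' :: rest) cur acc
              = PySem.Chars.splitOn.go ['\n'] f rest [] (cur.reverse :: acc) by
            simp [PySem.Chars.splitOn.go, List.isPrefixOf]]
        rw [ih f [] (cur.reverse :: acc) (by simpa using Nat.le_of_succ_le_succ hf)]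
        cases h : pvSplit rest with
        | nil => exact absurd h (pvSplit_ne_nil rest)
        | cons r rs => simp [pvSplit, pvConsHead, h]
      · rw [show PySem.Chars.splitOn.go ['\n'] (f+1) (c :: rest) cur acc
              = PySem.Chars.splitOn.go ['\n'] f rest (c :: cur) acc by
            have hp : List.isPrefixOf ['\n'] (c :: rest) = false := by
              simp [List.isPrefixOf, Ne.symm hc]
            simp [PySem.Chars.splitOn.go, hp]]
        rw [ih f (c :: cur) acc (by simpa using Nat.le_of_succ_le_succ hf)]
        cases h : pvSplit rest with
        | nil => exact absurd h (pvSplit_ne_nil rest)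
        | cons r rs => simp [pvSplit, pvConsHead, h, hc]

lemma pvSplitOn_eq_pvSplit (s : String) :
    PySem.Chars.splitOn s.toList ['\n'] = pvSplit s.toList := by
  rw [PySem.Chars.splitOn, pvSplitOn_go s.toList (s.toList.length + 1) [] [] (Nat.le_succ _)]
  cases h : pvSplit s.toList with
  | nil => exact absurd h (pvSplit_ne_nil s.toList)
  | cons r rs => simp [pvConsHead]

-- A's transpose table is a map over the range
lemma pvDiag_eq_map (s : String) :
    pvDiag1SymMatrix s
      = (PySem.List.pyRange 0 (pvBuildMatrix s).length 1).map
          (fun i =>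
            (PySem.List.pyRange 0 (PySem.List.pyGetD (pvBuildMatrix s) i []).length 1).map
              (fun j => PySem.List.pyGetD (PySem.List.pyGetD (pvBuildMatrix s) j []) i ' ')) := by
  simp only [pvDiag1SymMatrix, PySem.List.foldl_append_singleton_eq_map, List.nil_append]

-- the common reference form: each side-by-side line as a map over the pyRange of rows
def pvRef (s : String) : String :=
  let rows := pvSplit s.toList
  String.ofList (PySem.Chars.join ['\n']
    ((PySem.List.pyRange 0 rows.length 1).map
      (fun i =>
        PySem.List.pyGetD rows i [] ++ ['|'] ++
          (PySem.List.pyRange 0 (PySem.List.pyGetD rows i []).length 1).map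
            (fun j => PySem.List.pyGetD (PySem.List.pyGetD rows j []) i ' '))))

lemma pvA_eq_ref (s : String) : selfie_and_diag1 s = pvRef s := by
  simp only [selfie_and_diag1, pvRef, pvPrettyPrint, pvDiag_eq_map,
    PySem.List.foldl_append_singleton, PySem.List.foldl_append_singleton_eq_map,
    List.nil_append, pvBuildMatrix_eq_pvSplit]
  congr 1
  apply congrArg
  apply List.map_congr_left
  intro i hi
  obtain ⟨h0, h1⟩ : (0:Int) ≤ i ∧ i < (pvSplit s.toList).length := by
    simpa using (PySem.List.mem_pyRange_one).1 hi
  rw [show i = ((i.toNat : Nat) : Int) from (Int.toNat_of_nonneg h0).symm,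
    PySem.List.pyGetD_map_pyRange _ _ _ _ (by omega)]

-- ----- B side -----

-- the inner per-character step of B on Nat indices (the port's step after range conversion)
def pvG (b : List (List Char) × List Char) (j : Nat) : List (List Char) × List Char :=
  (b.1.modify j List.tail, b.2 ++ [(b.1.getD j []).headD ' '])

-- the outer per-row step of B on Nat indices
def pvGOut (acc : List (List Char) × List (List Char)) (row : List Char) :
    List (List Char) × List (List Char) :=
  (((List.range row.length).foldl pvG (acc.1, [])).1,
   acc.2 ++ [row ++ ['|'] ++ ((List.range row.length).foldl pvG (acc.1, [])).2])

-- the port's Int-indexed inner fold is the Nat-indexed one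
lemma pvInnerConv (row : List Char) (its : List (List Char)) :
    (PySem.List.pyRange 0 (row.length : Int) 1).foldl
      (fun (b : List (List Char) × List Char) j =>
        (b.1.modify j.toNat List.tail,
         b.2 ++ [(PySem.List.pyGetD b.1 j []).headD ' ']))
      (its, [])
    = (List.range row.length).foldl pvG (its, []) := by
  rw [PySem.List.pyRange_zero_natCast, List.foldl_map]
  have h : (fun (b : List (List Char) × List Char) (j : Nat) =>
      (b.1.modify ((j : Int)).toNat List.tail,
       b.2 ++ [(PySem.List.pyGetD b.1 (j : Int) []).headD ' '])) = pvG := by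
    funext b j
    simp [pvG, PySem.List.pyGetD_natCast]
  rw [h]

lemma pvGetDModifyTail (l : List (List Char)) (i j : Nat) :
    (l.modify i List.tail).getD j [] = if i = j then (l.getD j []).tail else l.getD j [] := by
  rw [List.getD_eq_getElem?_getD, List.getElem?_modify]
  cases h : l[j]? with
  | none =>
    have hlen : l.length ≤ j := List.getElem?_eq_none_iff.mp h
    rw [List.getD_eq_default _ _ hlen]
    split <;> simp
  | some v =>
    have hv : l.getD j [] = v := by rw [List.getD_eq_getElem?_getD, h]; rfl
    rw [hv]
    split <;> simp

-- inner loop: the cell collects the heads of the first m iterators; iterators 0..m-1 are consumed once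
lemma pvInner (m : Nat) (its : List (List Char)) (cell : List Char) :
    ((List.range m).foldl pvG (its, cell)).2
        = cell ++ (List.range m).map (fun j => (its.getD j []).headD ' ')
    ∧ (∀ j, ((List.range m).foldl pvG (its, cell)).1.getD j []
        = if j < m then (its.getD j []).tail else its.getD j [])
    ∧ ((List.range m).foldl pvG (its, cell)).1.length = its.length := by
  induction m with
  | zero => simp
  | succ m ih =>
    obtain ⟨ih2, ih1, ihl⟩ := ih
    rw [List.range_succ, List.foldl_append, List.foldl_cons, List.foldl_nil]
    refine ⟨?_, ?_, ?_⟩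
    · show (_ ++ _ : List Char) = _
      rw [ih2, ih1 m, if_neg (lt_irrefl m), List.map_append]
      simp
    · intro j
      show (List.modify _ _ _).getD j [] = _
      rw [pvGetDModifyTail, ih1 j]
      by_cases hj : m = j
      · subst hj
        rw [if_pos rfl, if_neg (lt_irrefl m), if_pos (Nat.lt_succ_self m)]
      · rw [if_neg hj]
        by_cases hjm : j < m
        · rw [if_pos hjm, if_pos (by omega)]
        · rw [if_neg hjm, if_neg (by omega)]
    · show (List.modify _ _ _).length = _
      rw [List.length_modify, ihl]

-- outer loop, from row i down: iterator j holds rows[j] with min i |rows[j]| characters consumed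
lemma pvOuter (rows : List (List Char))
    (Hsym : ∀ i j, i < rows.length → j < rows.length →
      (j < (rows.getD i []).length ↔ i < (rows.getD j []).length))
    (Hlen : ∀ i, i < rows.length → (rows.getD i []).length ≤ rows.length) :
    ∀ (k i : Nat), i + k = rows.length → ∀ (lines0 : List (List Char)),
      ((rows.drop i).foldl pvGOut
        ((List.range rows.length).map
          (fun j => (rows.getD j []).drop (min i (rows.getD j []).length)), lines0)).2
      = lines0 ++ (List.range' i k).map
          (fun t => rows.getD t [] ++ ['|'] ++
            (List.range (rows.getD t []).length).map
              (fun j => (rows.getD j []).getD t ' ')) := by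
  intro k
  induction k with
  | zero =>
    intro i hi lines0
    rw [List.drop_eq_nil_of_le (by omega)]
    simp
  | succ k ih =>
    intro i hi lines0
    have hin : i < rows.length := by omega
    have hgi : rows[i] = rows.getD i [] := (List.getD_eq_getElem rows [] hin).symm
    have hm : (rows.getD i []).length ≤ rows.length := Hlen i hin
    rw [List.drop_eq_getElem_cons hin, List.foldl_cons]
    obtain ⟨hcell, hgetD, hlenp⟩ :=
      pvInner (rows[i].length)
        ((List.range rows.length).map
          (fun j => (rows.getD j []).drop (min i (rows.getD j []).length))) []
    have hcell' :
        ((List.range (rows[i]).length).foldl pvG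
          ((List.range rows.length).map
            (fun j => (rows.getD j []).drop (min i (rows.getD j []).length)), [])).2
        = (List.range (rows.getD i []).length).map
            (fun j => (rows.getD j []).getD i ' ') := by
      rw [hcell, List.nil_append, hgi]
      apply List.map_congr_left
      intro j hj
      have hjm : j < (rows.getD i []).length := List.mem_range.mp hj
      have hjn : j < rows.length := by omega
      rw [PySem.List.getD_map_range _ _ _ _ hjn]
      have hij : i < (rows.getD j []).length := (Hsym i j hin hjn).mp hjm
      rw [Nat.min_eq_left (Nat.le_of_lt hij)]
      simp [List.headD_eq_head?_getD, List.head?_drop, List.getD_eq_getElem?_getD]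
    have hits' :
        ((List.range (rows[i]).length).foldl pvG
          ((List.range rows.length).map
            (fun j => (rows.getD j []).drop (min i (rows.getD j []).length)), [])).1
        = (List.range rows.length).map
            (fun j => (rows.getD j []).drop (min (i+1) (rows.getD j []).length)) := by
      apply List.ext_getElem
      · rw [hlenp]; simp
      · intro j hj1 hj2
        have hjn : j < rows.length := by simpa using hj2
        rw [← List.getD_eq_getElem _ [] hj1, ← List.getD_eq_getElem _ [] hj2,
          hgetD j, PySem.List.getD_map_range _ _ _ _ hjn,
          PySem.List.getD_map_range _ _ _ _ hjn]
        rw [hgi]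
        by_cases hjm : j < (rows.getD i []).length
        · rw [if_pos hjm]
          have hij : i < (rows.getD j []).length := (Hsym i j hin hjn).mp hjm
          rw [Nat.min_eq_left (Nat.le_of_lt hij), Nat.min_eq_left (by omega),
            List.tail_drop]
        · rw [if_neg hjm]
          have hij : (rows.getD j []).length ≤ i := by
            by_contra hc
            exact hjm ((Hsym i j hin hjn).mpr (by omega))
          rw [Nat.min_eq_right hij, Nat.min_eq_right (by omega)]
    rw [show pvGOut
          ((List.range rows.length).map
            (fun j => (rows.getD j []).drop (min i (rows.getD j []).length)), lines0) rows[i]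
        = ((List.range rows.length).map
            (fun j => (rows.getD j []).drop (min (i+1) (rows.getD j []).length)),
           lines0 ++ [rows.getD i [] ++ ['|'] ++
             (List.range (rows.getD i []).length).map
               (fun j => (rows.getD j []).getD i ' ')]) by
      simp only [pvGOut]
      rw [hits', hcell', hgi]]
    rw [ih (i+1) (by omega)]
    rw [List.range'_succ, List.map_cons]
    simp

-- pvRef with Nat ranges
lemma pvRef_range (s : String) :
    pvRef s = String.ofList (PySem.Chars.join ['\n']
      ((List.range (pvSplit s.toList).length).map
        (fun t => (pvSplit s.toList).getD t [] ++ ['|'] ++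
          (List.range ((pvSplit s.toList).getD t []).length).map
            (fun j => ((pvSplit s.toList).getD j []).getD t ' ')))) := by
  simp only [pvRef]
  congr 1
  apply congrArg
  rw [PySem.List.pyRange_zero_natCast, List.map_map]
  apply List.map_congr_left
  intro t _
  simp only [Function.comp, PySem.List.pyGetD_natCast]
  congr 1
  rw [PySem.List.pyRange_zero_natCast, List.map_map]
  apply List.map_congr_left
  intro j _
  simp [Function.comp, PySem.List.pyGetD_natCast]

lemma pvB_eq_ref (s : String) (hpre : Pre_selfie_and_diag1 s) :
    selfie_and_diag1_alt s = pvRef s := by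
  have hpre' : ∀ i < (pvSplit s.toList).length, ∀ j < ((pvSplit s.toList).getD i []).length,
      j < (pvSplit s.toList).length ∧ i < ((pvSplit s.toList).getD j []).length := by
    simpa [Pre_selfie_and_diag1, pvSplitOn_eq_pvSplit] using hpre
  have Hsym : ∀ i j, i < (pvSplit s.toList).length → j < (pvSplit s.toList).length →
      (j < ((pvSplit s.toList).getD i []).length ↔ i < ((pvSplit s.toList).getD j []).length) := by
    intro i j hi hj
    constructor
    · intro h; exact (hpre' i hi j h).2
    · intro h; exact (hpre' j hj i h).2
  have Hlen : ∀ i, i < (pvSplit s.toList).length →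
      ((pvSplit s.toList).getD i []).length ≤ (pvSplit s.toList).length := by
    intro i hi
    by_contra hc
    push_neg at hc
    obtain ⟨h1, _⟩ := hpre' i hi (pvSplit s.toList).length (by omega)
    omega
  simp only [selfie_and_diag1_alt, pvSplitOn_eq_pvSplit]
  have hfun : (fun (acc : List (List Char) × List (List Char)) row =>
      let q := (PySem.List.pyRange 0 (row.length : Int) 1).foldl
        (fun (b : List (List Char) × List Char) j =>
          (b.1.modify j.toNat List.tail,
           b.2 ++ [(PySem.List.pyGetD b.1 j []).headD ' ']))
        (acc.1, ([] : List Char))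
      (q.1, acc.2 ++ [row ++ ['|'] ++ q.2])) = pvGOut := by
    funext acc row
    simp only [pvInnerConv, pvGOut]
  rw [hfun]
  have hinit : pvSplit s.toList
      = (List.range (pvSplit s.toList).length).map
          (fun j => ((pvSplit s.toList).getD j []).drop
            (min 0 ((pvSplit s.toList).getD j []).length)) := by
    apply List.ext_getElem
    · simp
    · intro j hj1 hj2
      have hjn : j < (pvSplit s.toList).length := hj1
      rw [← List.getD_eq_getElem _ [] hj2, PySem.List.getD_map_range _ _ _ _ hjn,
        Nat.zero_min, List.drop_zero, List.getD_eq_getElem _ [] hj1]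
  rw [show (pvSplit s.toList).foldl pvGOut (pvSplit s.toList, [])
        = ((pvSplit s.toList).drop 0).foldl pvGOut
            ((List.range (pvSplit s.toList).length).map
              (fun j => ((pvSplit s.toList).getD j []).drop
                (min 0 ((pvSplit s.toList).getD j []).length)), []) by
      rw [List.drop_zero, ← hinit]]
  rw [pvOuter (pvSplit s.toList) Hsym Hlen (pvSplit s.toList).length 0 (by omega) []]
  rw [pvRef_range, List.nil_append, ← List.range_eq_range']

-- ===== VERDICT (by name: the statement is the Claim_ definition above) =====
theorem selfie_and_diag1_spec : Claim_equal_selfie_and_diag1 := by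
  intro s _ hpre
  show _ = _
  rw [pvA_eq_ref, pvB_eq_ref s hpre]
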